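-- pv_equiv track=rewrite | github.com/Fosfarit/Home_Work | src/filter_bank_transactions_by_word.py | process_bank_operations_advanced
-- ===== SOURCE A (Python) =====
-- def process_bank_operations_advanced(data: list[dict], categories: list, case_sensitive: bool = False) -> dict:
--     """
--     Функция считает количество операций.
--     """
--     category_count = {category: 0 for category in categories}
--
--     for operation in data:
--         description = operation.get('description')
--         if not description:
--             continue
--
--         if not case_sensitive:
--             description = description.lower()
--             matched_categories = [cat for cat in categories if cat.lower() == description]
--         else:
--             matched_categories = [cat for cat in categories if cat == description]
--
--         for category in matched_categories:
--             category_count[category] += 1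
--
--     return category_count
-- ===== SOURCE B (Python) =====
-- def process_bank_operations_advanced(data: list[dict], categories: list, case_sensitive: bool = False) -> dict:
--     """
--     Counts operations per category via a description-count table (two passes).
--     """
--     counter = {}
--     for operation in data:
--         description = operation.get('description')
--         if not description:
--             continue
--         key = description if case_sensitive else description.lower()
--         counter[key] = counter.get(key, 0) + 1
--
--     result = {category: 0 for category in categories}
--     for category in categories:
--         key = category if case_sensitive else category.lower()
--         result[category] += counter.get(key, 0)
--     return result
-- ===== Notes on version B (the rewrite author's own statement) =====
-- stated objective: alternative
-- what changed: Replaces A's per-operation rescan of the whole categories list by two passes: build a counter of (normalized) descriptions once, then accumulate result[c] += counter.get(key, 0) over categories.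
import Mathlib
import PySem

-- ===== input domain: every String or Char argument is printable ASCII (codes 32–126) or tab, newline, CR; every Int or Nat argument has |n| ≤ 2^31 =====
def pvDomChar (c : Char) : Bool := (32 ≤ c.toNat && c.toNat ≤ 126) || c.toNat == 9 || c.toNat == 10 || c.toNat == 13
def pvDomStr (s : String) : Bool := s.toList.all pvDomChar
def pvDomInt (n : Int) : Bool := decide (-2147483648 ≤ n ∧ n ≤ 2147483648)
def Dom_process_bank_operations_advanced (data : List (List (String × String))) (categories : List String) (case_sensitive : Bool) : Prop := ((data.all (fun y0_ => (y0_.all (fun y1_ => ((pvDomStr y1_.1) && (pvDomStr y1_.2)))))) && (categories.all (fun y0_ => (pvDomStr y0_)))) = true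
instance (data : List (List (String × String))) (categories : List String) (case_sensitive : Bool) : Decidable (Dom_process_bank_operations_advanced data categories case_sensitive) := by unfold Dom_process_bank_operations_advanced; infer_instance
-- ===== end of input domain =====

-- ===== PORT A =====
-- B replaces A's per-operation rescan of all categories by a description counter built once; proved to return the same dict.
def process_bank_operations_advanced (data : List (List (String × String))) (categories : List String) (case_sensitive : Bool) : List (String × Int) :=
  let category_count : PySem.Dict String Int :=
    categories.foldl (fun d category => d.insert category 0) PySem.Dict.empty
  let final : PySem.Dict String Int :=
    data.foldl (fun cc operation =>
      match List.lookup "description" operation with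
      | none => cc
      | some description =>
        if description = "" then cc
        else
          let matched_categories :=
            if !case_sensitive then
              let description' := PySem.Str.lower description
              categories.filter (fun cat => PySem.Str.lower cat == description')
            else
              categories.filter (fun cat => cat == description)
          matched_categories.foldl (fun d category => d.modify category 0 (· + 1)) cc) category_count
  final.items

-- ===== PORT B =====
-- normalization key used by B
def pvNorm (case_sensitive : Bool) (s : String) : String :=
  if case_sensitive then s else PySem.Str.lower s

def process_bank_operations_advanced_alt (data : List (List (String × String))) (categories : List String) (case_sensitive : Bool) : List (String × Int) :=
  let counter : PySem.Dict String Int :=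
    data.foldl (fun cnt operation =>
      match List.lookup "description" operation with
      | none => cnt
      | some description =>
        if description = "" then cnt
        else
          let key := pvNorm case_sensitive description
          cnt.insert key (cnt.getD key 0 + 1)) PySem.Dict.empty
  let result : PySem.Dict String Int :=
    categories.foldl (fun d category => d.insert category 0) PySem.Dict.empty
  (categories.foldl (fun r category =>
      let key := pvNorm case_sensitive category
      r.insert category (r.getD category 0 + counter.getD key 0)) result).items

-- ===== PRECONDITION & SPEC =====
def Spec_process_bank_operations_advanced (data : List (List (String × String))) (categories : List String) (case_sensitive : Bool) (out : List (String × Int)) : Prop := out = process_bank_operations_advanced_alt data categories case_sensitive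
instance (data : List (List (String × String))) (categories : List String) (case_sensitive : Bool) (out : List (String × Int)) : Decidable (Spec_process_bank_operations_advanced data categories case_sensitive out) := by unfold Spec_process_bank_operations_advanced; infer_instance

-- ===== CLAIM (what is proved, stated in full; the proofs are below) =====
def Claim_equal_process_bank_operations_advanced : Prop := ∀ (data : List (List (String × String))) (categories : List String) (case_sensitive : Bool), Dom_process_bank_operations_advanced data categories case_sensitive → Spec_process_bank_operations_advanced data categories case_sensitive (process_bank_operations_advanced data categories case_sensitive)

-- ===== LEMMAS AND PROOFS =====

-- the normalized non-empty descriptions of the operations, in order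
def pvDescs (data : List (List (String × String))) (case_sensitive : Bool) : List String :=
  data.filterMap (fun operation =>
    (List.lookup "description" operation).bind
      (fun description => if description = "" then none else some (pvNorm case_sensitive description)))

-- A's outer loop, reshaped as a fold over the normalized descriptions
def pvStepA (categories : List String) (case_sensitive : Bool)
    (d : PySem.Dict String Int) (k : String) : PySem.Dict String Int :=
  (categories.filter (fun cat => pvNorm case_sensitive cat == k)).foldl
    (fun d category => d.modify category 0 (· + 1)) d

lemma pvA_fold_eq (data : List (List (String × String))) (categories : List String)
    (case_sensitive : Bool) (d : PySem.Dict String Int) :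
    data.foldl (fun cc operation =>
      match List.lookup "description" operation with
      | none => cc
      | some description =>
        if description = "" then cc
        else
          let matched_categories :=
            if !case_sensitive then
              let description' := PySem.Str.lower description
              categories.filter (fun cat => PySem.Str.lower cat == description')
            else
              categories.filter (fun cat => cat == description)
          matched_categories.foldl (fun d category => d.modify category 0 (· + 1)) cc) d
    = (pvDescs data case_sensitive).foldl (pvStepA categories case_sensitive) d := by
  induction data generalizing d with
  | nil => rfl
  | cons op rest ih =>
    simp only [List.foldl_cons, pvDescs, List.filterMap_cons]
    cases h : List.lookup "description" op with
    | none => simpa [pvDescs] using ih d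
    | some description =>
      by_cases he : description = ""
      · simp only [he, Option.bind_some, reduceIte]
        simpa [pvDescs] using ih d
      · simp only [Option.bind_some, if_neg he]
        cases case_sensitive with
        | false =>
          simpa [pvDescs, pvStepA, pvNorm] using ih _
        | true =>
          simpa [pvDescs, pvStepA, pvNorm] using ih _

lemma pvCnt_fold_eq (data : List (List (String × String))) (case_sensitive : Bool)
    (d : PySem.Dict String Int) :
    data.foldl (fun cnt operation =>
      match List.lookup "description" operation with
      | none => cnt
      | some description =>
        if description = "" then cnt
        else
          let key := pvNorm case_sensitive description
          cnt.insert key (cnt.getD key 0 + 1)) d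
    = (pvDescs data case_sensitive).foldl (fun cnt key => cnt.insert key (cnt.getD key 0 + 1)) d := by
  induction data generalizing d with
  | nil => rfl
  | cons op rest ih =>
    simp only [List.foldl_cons, pvDescs, List.filterMap_cons]
    cases h : List.lookup "description" op with
    | none => simpa [pvDescs] using ih d
    | some description =>
      by_cases he : description = ""
      · simp only [he, Option.bind_some, reduceIte]
        simpa [pvDescs] using ih d
      · simp only [Option.bind_some, if_neg he]
        simpa [pvDescs] using ih _

-- getD through A's fold over the descriptions
lemma pvA_getD (categories : List String) (case_sensitive : Bool)
    (L : List String) (d : PySem.Dict String Int) (c : String) :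
    ((L.foldl (pvStepA categories case_sensitive) d).getD c 0)
      = d.getD c 0 + (categories.count c : Int) * (L.count (pvNorm case_sensitive c) : Int) := by
  induction L generalizing d with
  | nil => simp
  | cons k rest ih =>
    rw [List.foldl_cons, ih]
    have hstep : (pvStepA categories case_sensitive d k).getD c 0
        = d.getD c 0 + (if pvNorm case_sensitive c = k then (categories.count c : Int) else 0) := by
      rw [pvStepA, PySem.Dict.getD_foldl_modify_add_one]
      by_cases h : pvNorm case_sensitive c = k
      · rw [if_pos h]
        have : (categories.filter (fun cat => pvNorm case_sensitive cat == k)).count c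
            = categories.count c := by
          simp [List.count_filter, h]
        rw [this]
      · rw [if_neg h]
        have hz : (categories.filter (fun cat => pvNorm case_sensitive cat == k)).count c = 0 :=
          List.count_eq_zero.2 (fun hc => h (by simpa using (List.mem_filter.1 hc).2))
        rw [hz]; simp
    rw [hstep, List.count_cons]
    by_cases h : pvNorm case_sensitive c = k
    · have hk : (k == pvNorm case_sensitive c) = true := by simp [h]
      simp only [if_pos h, hk, if_true]
      push_cast; ring
    · have hk : (k == pvNorm case_sensitive c) = false := by
        simp [beq_eq_false_iff_ne]; exact fun hh => h hh.symm
      simp only [if_neg h, hk, Bool.false_eq_true, if_false]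
      push_cast; ring

-- getD through B's result loop
lemma pvB_getD (case_sensitive : Bool) (n : String → Int)
    (cats : List String) (d : PySem.Dict String Int) (c : String) :
    ((cats.foldl (fun r category =>
        r.insert category (r.getD category 0 + n category)) d).getD c 0)
      = d.getD c 0 + (cats.count c : Int) * n c := by
  induction cats generalizing d with
  | nil => simp
  | cons x rest ih =>
    rw [List.foldl_cons, ih, List.count_cons, PySem.Dict.getD_insert]
    by_cases h : c = x
    · subst h; simp; ring
    · have : ¬ (x = c) := fun hh => h hh.symm
      simp [h, this]

-- adding already-present elements to a PySem.Set is a no-op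
lemma pvSet_update_of_subset (l : List String) (s : PySem.Set String)
    (h : ∀ x ∈ l, x ∈ s) : PySem.Set.update s l = s := by
  induction l generalizing s with
  | nil => rfl
  | cons x rest ih =>
    have hx : x ∈ s := h x (by simp)
    have hadd : PySem.Set.add s x = s := by
      simp [PySem.Set.add, PySem.Set.contains, hx]
    have hstep : PySem.Set.update s (x :: rest) = PySem.Set.update s rest := by
      simp [PySem.Set.update, hadd]
    rw [hstep]
    exact ih s (fun y hy => h y (List.mem_cons_of_mem _ hy))

-- keys of A's fold stay exactly the distinct categories
lemma pvA_keys (categories : List String) (case_sensitive : Bool)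
    (L : List String) (d : PySem.Dict String Int)
    (h : ∀ x ∈ categories, x ∈ d.keys) :
    (L.foldl (pvStepA categories case_sensitive) d).keys = d.keys := by
  induction L generalizing d with
  | nil => rfl
  | cons k rest ih =>
    rw [List.foldl_cons]
    have hk : (pvStepA categories case_sensitive d k).keys = d.keys := by
      rw [pvStepA, PySem.Dict.keys_foldl_modify]
      exact pvSet_update_of_subset _ _ (fun x hx => h x (List.mem_of_mem_filter hx))
    rw [ih _ (by rw [hk]; exact h), hk]

-- keys of B's result loop stay exactly the distinct categories
lemma pvB_keys (case_sensitive : Bool) (n : String → Int)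
    (cats : List String) (d : PySem.Dict String Int)
    (h : ∀ x ∈ cats, x ∈ d.keys) :
    (cats.foldl (fun r category =>
        r.insert category (r.getD category 0 + n category)) d).keys = d.keys := by
  rw [PySem.Dict.keys_foldl_insert]
  exact pvSet_update_of_subset _ _ h

lemma pvInit_keys (categories : List String) :
    (categories.foldl (fun d category => d.insert category 0) (PySem.Dict.empty : PySem.Dict String Int)).keys
      = PySem.Set.ofList categories := by
  rw [PySem.Dict.keys_foldl_insert]
  simp [PySem.Dict.keys_empty, PySem.Set.update_nil_left]

-- ===== VERDICT (by name: the statement is the Claim_ definition above) =====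
theorem process_bank_operations_advanced_spec : Claim_equal_process_bank_operations_advanced := by
  intro data categories case_sensitive _
  unfold Spec_process_bank_operations_advanced
  unfold process_bank_operations_advanced process_bank_operations_advanced_alt
  simp only []
  set init : PySem.Dict String Int :=
    categories.foldl (fun d category => d.insert category 0) PySem.Dict.empty with hinit
  rw [pvA_fold_eq, pvCnt_fold_eq]
  set L := pvDescs data case_sensitive with hL
  have hkeys_init : init.keys = PySem.Set.ofList categories := pvInit_keys categories
  have hsub : ∀ x ∈ categories, x ∈ init.keys := by
    intro x hx; rw [hkeys_init]; exact (PySem.Set.mem_ofList _ _).2 hx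
  have hnd : init.keys.Nodup := by rw [hkeys_init]; exact PySem.Set.nodup_ofList _
  -- the counter's lookups are counts of L
  have hcnt : ∀ k, ((L.foldl (fun cnt key => cnt.insert key (cnt.getD key 0 + 1))
      (PySem.Dict.empty : PySem.Dict String Int)).getD k 0) = (L.count k : Int) := by
    intro k
    rw [PySem.Dict.getD_foldl_insert_add_one]
    simp
  set A := L.foldl (pvStepA categories case_sensitive) init with hA
  set B := categories.foldl (fun r category =>
      r.insert category (r.getD category 0 +
        (L.foldl (fun cnt key => cnt.insert key (cnt.getD key 0 + 1))
          (PySem.Dict.empty : PySem.Dict String Int)).getD (pvNorm case_sensitive category) 0)) init with hB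
  have hAkeys : A.keys = init.keys := pvA_keys categories case_sensitive L init hsub
  have hBkeys : B.keys = init.keys := pvB_keys case_sensitive _ categories init hsub
  have hAnd : A.keys.Nodup := by rw [hAkeys]; exact hnd
  have hBnd : B.keys.Nodup := by rw [hBkeys]; exact hnd
  have hgetD : ∀ c, A.getD c 0 = B.getD c 0 := by
    intro c
    rw [hA, pvA_getD]
    rw [hB, pvB_getD case_sensitive
      (fun category => (L.foldl (fun cnt key => cnt.insert key (cnt.getD key 0 + 1))
          (PySem.Dict.empty : PySem.Dict String Int)).getD (pvNorm case_sensitive category) 0)]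
    rw [hcnt]
  rw [PySem.Dict.items_eq_map_keys A hAnd 0, PySem.Dict.items_eq_map_keys B hBnd 0,
    hAkeys, hBkeys]
  exact List.map_congr_left (fun k _ => by rw [hgetD])
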